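-- pv_equiv track=rewrite | github.com/SDM-TIB/CoPCA | Symbolic Learning/constraint-driven-pca-calculator.py | _extract_triple_patterns
-- ===== SOURCE A (Python) =====
-- from typing import Set, Optional, Dict, List, Tuple
--
-- def _extract_triple_patterns(pattern_str: str) -> List[Tuple[str, str, str]]:
--     """Extract triple patterns from a string"""
--     patterns = []
--     tokens = pattern_str.strip().split()
--     tokens = [t for t in tokens if t]
--
--     i = 0
--     while i + 2 < len(tokens):
--         subject = tokens[i]
--         predicate = tokens[i + 1]
--         obj = tokens[i + 2]
--         patterns.append((subject, predicate, obj))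
--         i += 3
--
--     return patterns
-- ===== SOURCE B (Python) =====
-- from typing import List, Tuple
--
-- def _extract_triple_patterns(pattern_str: str) -> List[Tuple[str, str, str]]:
--     """Extract triple patterns from a string (iterator-grouper idiom)."""
--     it = iter(pattern_str.split())
--     return list(zip(it, it, it))
-- ===== Notes on version B (the rewrite author's own statement) =====
-- stated objective: idiomatic
-- what changed: Replaces the index-arithmetic while-loop (i, i+1, i+2, bounds check, append) with the shared-iterator zip grouper over split(), which consumes three tokens at a time and truncates the 1-2 leftover tokens naturally; strip() and the truthiness filter are dropped as split() already yields non-empty tokens.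
import Mathlib
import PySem

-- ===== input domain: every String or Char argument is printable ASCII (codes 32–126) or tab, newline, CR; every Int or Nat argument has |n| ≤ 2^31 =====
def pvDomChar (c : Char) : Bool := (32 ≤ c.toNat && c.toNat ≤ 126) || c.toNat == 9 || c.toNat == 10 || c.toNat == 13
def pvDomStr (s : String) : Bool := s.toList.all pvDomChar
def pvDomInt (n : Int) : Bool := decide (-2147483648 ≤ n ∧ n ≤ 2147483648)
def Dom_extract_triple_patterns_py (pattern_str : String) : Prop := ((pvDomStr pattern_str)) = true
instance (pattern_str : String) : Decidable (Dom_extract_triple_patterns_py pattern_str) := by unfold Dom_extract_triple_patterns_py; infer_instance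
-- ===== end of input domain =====

-- B replaces A's index-arithmetic while-loop with the shared-iterator zip grouper (idiomatic; same cost).
-- ===== PORT A =====
-- the 'while i + 2 < len(tokens)' loop of A, step for step (in-range indexing, append, i += 3)
def extractLoopA (tokens : List String) (i : Nat)
    (patterns : List (String × String × String)) : List (String × String × String) :=
  if h : i + 2 < tokens.length then
    let subject := tokens[i]'(by omega)
    let predicate := tokens[i + 1]'(by omega)
    let obj := tokens[i + 2]'(by omega)
    extractLoopA tokens (i + 3) (patterns ++ [(subject, predicate, obj)])
  else patterns
termination_by tokens.length - i

def extract_triple_patterns_py (pattern_str : String) : List (String × String × String) :=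
  let tokens := PySem.Str.split₀ (PySem.Str.strip pattern_str)
  let tokens := tokens.filter (fun t => t != "")
  extractLoopA tokens 0 []

-- ===== PORT B =====
-- list(zip(it, it, it)) on a shared iterator: consume three tokens at a time, drop the remainder
def groupTriples : List String → List (String × String × String)
  | a :: b :: c :: rest => (a, b, c) :: groupTriples rest
  | _ => []

def extract_triple_patterns_py_alt (pattern_str : String) : List (String × String × String) :=
  groupTriples (PySem.Str.split₀ pattern_str)

-- ===== PRECONDITION & SPEC =====
def Spec_extract_triple_patterns_py (pattern_str : String) (out : List (String × String × String)) : Prop := out = extract_triple_patterns_py_alt pattern_str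
instance (pattern_str : String) (out : List (String × String × String)) : Decidable (Spec_extract_triple_patterns_py pattern_str out) := by unfold Spec_extract_triple_patterns_py; infer_instance

-- ===== CLAIM (what is proved, stated in full; the proofs are below) =====
def Claim_equal_extract_triple_patterns_py : Prop := ∀ (pattern_str : String), Dom_extract_triple_patterns_py pattern_str → Spec_extract_triple_patterns_py pattern_str (extract_triple_patterns_py pattern_str)

-- ===== LEMMAS AND PROOFS =====

-- split₀.go over an all-whitespace tail with empty current word just finishes
theorem go_all_space (ws : List Char) (hws : ∀ c ∈ ws, PySem.Chars.isspace c = true)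
    (acc : List (List Char)) : PySem.Chars.split₀.go ws [] acc = acc.reverse := by
  induction ws generalizing acc with
  | nil => simp [PySem.Chars.split₀.go]
  | cons c rest ih =>
    have hc := hws c (by simp)
    simp only [PySem.Chars.split₀.go, hc, List.isEmpty_nil, if_true]
    exact ih (fun d hd => hws d (by simp [hd])) acc

-- appending trailing whitespace does not change split₀.go
theorem go_append_space (ws : List Char) (hws : ∀ c ∈ ws, PySem.Chars.isspace c = true)
    (s cur : List Char) (acc : List (List Char)) :
    PySem.Chars.split₀.go (s ++ ws) cur acc = PySem.Chars.split₀.go s cur acc := by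
  induction s generalizing cur acc with
  | nil =>
    simp only [List.nil_append]
    cases hcur : cur.isEmpty with
    | true =>
      have : cur = [] := by simpa using hcur
      subst this
      rw [go_all_space ws hws acc]
      simp [PySem.Chars.split₀.go]
    | false =>
      induction ws with
      | nil => rfl
      | cons w ws' ih' =>
        have hw := hws w (by simp)
        have h1 : PySem.Chars.split₀.go (w :: ws') cur acc
            = PySem.Chars.split₀.go ws' [] (cur.reverse :: acc) := by
          simp [PySem.Chars.split₀.go, hw, hcur]
        rw [h1, go_all_space ws' (fun d hd => hws d (by simp [hd])) (cur.reverse :: acc)]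
        simp [PySem.Chars.split₀.go, hcur]
  | cons c s' ih =>
    by_cases hc : PySem.Chars.isspace c = true
    · cases hcur : cur.isEmpty <;>
        simp only [List.cons_append, PySem.Chars.split₀.go, hc, hcur] <;>
        exact ih _ _
    · simp only [List.cons_append, PySem.Chars.split₀.go, hc]
      exact ih _ _

-- dropping leading whitespace does not change split₀.go from an empty current word
theorem go_lstrip (s : List Char) (acc : List (List Char)) :
    PySem.Chars.split₀.go (List.dropWhile PySem.Chars.isspace s) [] acc
      = PySem.Chars.split₀.go s [] acc := by
  induction s generalizing acc with
  | nil => rfl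
  | cons c rest ih =>
    by_cases hc : PySem.Chars.isspace c = true
    · rw [List.dropWhile_cons_of_pos (by simpa using hc)]
      rw [ih acc]
      simp [PySem.Chars.split₀.go, hc]
    · rw [List.dropWhile_cons_of_neg (by simpa using hc)]

theorem split₀_strip (s : List Char) :
    PySem.Chars.split₀ (PySem.Chars.strip s) = PySem.Chars.split₀ s := by
  unfold PySem.Chars.split₀ PySem.Chars.strip PySem.Chars.rstrip PySem.Chars.lstrip
  set t := List.dropWhile PySem.Chars.isspace s with ht
  have hdec : t = (List.dropWhile PySem.Chars.isspace t.reverse).reverse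
      ++ (List.takeWhile PySem.Chars.isspace t.reverse).reverse := by
    have h := List.takeWhile_append_dropWhile (p := PySem.Chars.isspace) (l := t.reverse)
    rw [← List.reverse_append, h, List.reverse_reverse]
  have hws : ∀ c ∈ (List.takeWhile PySem.Chars.isspace t.reverse).reverse,
      PySem.Chars.isspace c = true := by
    intro c hc
    exact List.mem_takeWhile_imp (by simpa using hc)
  calc PySem.Chars.split₀.go (List.dropWhile PySem.Chars.isspace t.reverse).reverse [] []
      = PySem.Chars.split₀.go ((List.dropWhile PySem.Chars.isspace t.reverse).reverse
          ++ (List.takeWhile PySem.Chars.isspace t.reverse).reverse) [] [] := by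
        rw [go_append_space _ hws]
    _ = PySem.Chars.split₀.go t [] [] := by rw [← hdec]
    _ = PySem.Chars.split₀.go s [] [] := by rw [ht]; exact go_lstrip s []

-- every word split₀ produces is non-empty
theorem go_words_ne_nil (s cur : List Char) (acc : List (List Char))
    (hacc : ∀ t ∈ acc, t ≠ []) :
    ∀ t ∈ PySem.Chars.split₀.go s cur acc, t ≠ [] := by
  induction s generalizing cur acc with
  | nil =>
    intro t ht
    by_cases hcur : cur.isEmpty = true
    · simp only [PySem.Chars.split₀.go, if_pos hcur] at ht
      exact hacc t (by simpa using ht)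
    · simp only [PySem.Chars.split₀.go, if_neg hcur] at ht
      simp only [List.mem_reverse, List.mem_cons] at ht
      rcases ht with rfl | h
      · simp only [ne_eq, List.reverse_eq_nil_iff]
        simpa using hcur
      · exact hacc t h
  | cons c rest ih =>
    intro t ht
    by_cases hc : PySem.Chars.isspace c = true
    · simp only [PySem.Chars.split₀.go, if_pos hc] at ht
      by_cases hcur : cur.isEmpty = true
      · rw [if_pos hcur] at ht; exact ih [] acc hacc t ht
      · rw [if_neg hcur] at ht
        refine ih [] (cur.reverse :: acc) ?_ t ht
        intro u hu
        rcases List.mem_cons.mp hu with rfl | hu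
        · simp only [ne_eq, List.reverse_eq_nil_iff]; simpa using hcur
        · exact hacc u hu
    · simp only [PySem.Chars.split₀.go, if_neg hc] at ht
      exact ih (c :: cur) acc hacc t ht

theorem split₀_words_ne (s : String) : ∀ t ∈ PySem.Str.split₀ s, (t != "") = true := by
  intro t ht
  unfold PySem.Str.split₀ at ht
  rcases List.mem_map.mp ht with ⟨cs, hcs, rfl⟩
  have hne : cs ≠ [] :=
    go_words_ne_nil s.toList [] [] (by simp) cs hcs
  simp only [bne_iff_ne, ne_eq]
  intro h
  apply hne
  have := congrArg String.toList h
  simpa using this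

-- groupTriples of a list shorter than 3 is empty
theorem groupTriples_short (l : List String) (h : l.length < 3) : groupTriples l = [] := by
  match l, h with
  | [], _ => rfl
  | [_], _ => rfl
  | [_, _], _ => rfl

-- the index loop of A computes groupTriples of the remaining suffix
theorem extractLoopA_eq (tokens : List String) (i : Nat)
    (acc : List (String × String × String)) :
    extractLoopA tokens i acc = acc ++ groupTriples (tokens.drop i) := by
  induction hn : tokens.length - i using Nat.strong_induction_on generalizing i acc with
  | _ n ih =>
    by_cases h : i + 2 < tokens.length
    · have h0 : i < tokens.length := by omega
      have h1 : i + 1 < tokens.length := by omega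
      rw [extractLoopA, dif_pos h]
      rw [ih (tokens.length - (i + 3)) (by omega) (i + 3) _ rfl]
      have hd : tokens.drop i
          = tokens[i] :: tokens[i+1] :: tokens[i+2] :: tokens.drop (i + 3) := by
        rw [List.drop_eq_getElem_cons h0, List.drop_eq_getElem_cons h1,
            List.drop_eq_getElem_cons h]
      rw [hd]
      simp [groupTriples]
    · rw [extractLoopA, dif_neg h]
      rw [groupTriples_short _ (by simp; omega)]
      simp

-- ===== VERDICT (by name: the statement is the Claim_ definition above) =====
theorem extract_triple_patterns_py_spec : Claim_equal_extract_triple_patterns_py := by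
  intro s _
  unfold Spec_extract_triple_patterns_py
  unfold extract_triple_patterns_py extract_triple_patterns_py_alt
  simp only
  rw [List.filter_eq_self.mpr (split₀_words_ne _)]
  rw [extractLoopA_eq, List.drop_zero, List.nil_append]
  unfold PySem.Str.split₀
  rw [PySem.Str.toList_strip, split₀_strip]
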